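-- pv_equiv track=rewrite | github.com/masonknott/PythonChallenge | PythonExercisesAndChecker.py | exercise_7
-- ===== SOURCE A (Python) =====
-- def exercise_7(x):
--     myList = [] #append to
--     for ele in x:#iterates through string and appends to list
--         myList.append(ele)#append statement
--
--     a1 = 0#using var
--     y = 0#functions as a counter
--     while y <= (len(x)-1):
--         x.sort()#orders list low-high
--         temp = x[y]#list index 0
--         x.remove(x[y])#removes index 0 from list
--         for u in x:#iterate through x
--             if temp in u:
--                 a2 = 0
--                 while a2 <=(len(myList)-1):
--                     if temp == myList[a2]:
--                         a1 = a1 + 1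
--                         return a2
--                     a2 = a2 + 1
--         x.append(temp)
--         y = y + 1
--     if a1 == 0:
--         return -1
-- ===== SOURCE B (Python) =====
-- def exercise_7(x):
--     # Scan the values in sorted order; a value qualifies if it occurs as a
--     # substring of at least two elements of x (itself plus one other, so a
--     # duplicate counts).  Return the first original index of the smallest
--     # qualifying value, else -1.  (Does not mutate x.)
--     for temp in sorted(x):
--         if sum(1 for u in x if temp in u) >= 2:
--             return x.index(temp)
--     return -1
-- ===== Notes on version B (the rewrite author's own statement) =====
-- stated objective: simpler
-- what changed: A re-sorts and mutates the list on every iteration (sort, remove, rescan the copy with an index loop, append); B sorts once, scans the sorted values testing whether the value occurs as a substring of at least two list elements, and returns the first original index via one list.index call, never mutating the input.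
import Mathlib
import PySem

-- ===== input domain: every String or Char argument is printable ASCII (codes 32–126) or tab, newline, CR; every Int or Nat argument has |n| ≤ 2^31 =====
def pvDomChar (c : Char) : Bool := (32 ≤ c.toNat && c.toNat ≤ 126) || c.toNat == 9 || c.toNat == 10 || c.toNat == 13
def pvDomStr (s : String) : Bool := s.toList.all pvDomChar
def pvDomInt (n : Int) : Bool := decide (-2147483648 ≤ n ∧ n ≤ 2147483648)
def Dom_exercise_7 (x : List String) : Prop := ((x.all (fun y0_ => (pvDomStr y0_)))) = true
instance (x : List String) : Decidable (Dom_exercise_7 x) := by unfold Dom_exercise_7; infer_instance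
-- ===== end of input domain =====

-- B sorts once and scans the sorted values with a substring-occurrence count instead of
-- A's per-step re-sort / remove / rescan / append on a mutated list (objective: simpler;
-- the equivalence is about the RETURN value only — A additionally leaves its list
-- argument sorted in place, B does not mutate it).

-- ===== PORT A =====
-- the while loop: `x` is the mutated list, `myList` the saved copy, `y` the counter;
-- fuel = number of remaining iterations (the list's length is invariant across an iteration)
def exercise_7_loop (myList : List String) (x : List String) (y : Nat) (fuel : Nat) : Int :=
  match fuel with
  | 0 => -1                                  -- while exit: a1 == 0, return -1
  | f + 1 =>
    if (y : Int) ≤ (x.length : Int) - 1 then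
      -- x.sort(); temp = x[y]  (the sorted list written out at each use)
      match PySem.List.pyGet? (PySem.List.sorted x (fun s => s) false) (y : Int) with
      | none => -1                                            -- (unreachable: y in range)
      | some temp =>
        match PySem.List.remove? (PySem.List.sorted x (fun s => s) false) temp with  -- x.remove(x[y])
        | none => -1                                          -- (unreachable: temp ∈ x)
        | some xr =>
          if xr.any (fun u => PySem.Str.isIn temp u) then     -- for u in x: if temp in u
            match PySem.List.index? myList temp with          -- inner while scans myList
            | some a2 => (a2 : Int)                           -- return a2
            | none => exercise_7_loop myList (xr ++ [temp]) (y + 1) f  -- scan found nothing: loop goes on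
          else
            exercise_7_loop myList (xr ++ [temp]) (y + 1) f   -- x.append(temp); y = y + 1
    else -1                                                   -- if a1 == 0: return -1

def exercise_7 (x : List String) : Int :=
  exercise_7_loop x x 0 x.length

-- ===== PORT B =====
-- the for loop over sorted(x); the 0/1-generator sum is the occurrence count
def exercise_7_alt_go (x : List String) : List String → Int
  | [] => -1                                                  -- return -1
  | temp :: rest =>
      if 2 ≤ List.countP (fun u => PySem.Str.isIn temp u) x then  -- sum(1 for u in x if temp in u) >= 2
        (((PySem.List.index? x temp).getD 0 : Nat) : Int)     -- return x.index(temp)  (temp ∈ x always)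
      else exercise_7_alt_go x rest

def exercise_7_alt (x : List String) : Int :=
  exercise_7_alt_go x (PySem.List.sorted x (fun s => s) false)

-- ===== PRECONDITION & SPEC =====
def Spec_exercise_7 (x : List String) (out : Int) : Prop := out = exercise_7_alt x
instance (x : List String) (out : Int) : Decidable (Spec_exercise_7 x out) := by unfold Spec_exercise_7; infer_instance

-- ===== CLAIM (what is proved, stated in full; the proofs are below) =====
def Claim_equal_exercise_7 : Prop := ∀ (x : List String), Dom_exercise_7 x → Spec_exercise_7 x (exercise_7 x)

-- ===== LEMMAS AND PROOFS =====

lemma isIn_self (s : String) : PySem.Chars.isIn s.toList s.toList = true :=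
  (PySem.Chars.isIn_iff_infix _ _).mpr List.infix_rfl

-- A's qualification test (temp occurs inside the list with temp removed) equals
-- B's (temp occurs inside at least two elements of the original list)
lemma any_erase_iff (x0 : List String) (temp : String)
    (hmem : temp ∈ PySem.List.sorted x0 (fun s => s) false) :
    (((PySem.List.sorted x0 (fun s => s) false).erase temp).any
        (fun u => PySem.Str.isIn temp u) = true) ↔
      2 ≤ List.countP (fun u => PySem.Str.isIn temp u) x0 := by
  set s := PySem.List.sorted x0 (fun s => s) false with hs
  have hperm : s.Perm x0 := PySem.List.sorted_perm x0 (fun s => s) false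
  have hpc : s.Perm (temp :: s.erase temp) := List.perm_cons_erase hmem
  have hcount : List.countP (fun u => PySem.Str.isIn temp u) x0
      = List.countP (fun u => PySem.Str.isIn temp u) (s.erase temp) + 1 := by
    rw [← hperm.countP_eq, hpc.countP_eq, List.countP_cons]
    simp [isIn_self]
  constructor
  · intro h
    rcases List.any_eq_true.mp h with ⟨u, hu, hpu⟩
    have : 0 < List.countP (fun u => PySem.Str.isIn temp u) (s.erase temp) :=
      List.countP_pos_iff.mpr ⟨u, hu, hpu⟩
    omega
  · intro h
    have : 0 < List.countP (fun u => PySem.Str.isIn temp u) (s.erase temp) := by omega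
    rcases List.countP_pos_iff.mp this with ⟨u, hu, hpu⟩
    exact List.any_eq_true.mpr ⟨u, hu, hpu⟩

-- main loop invariant: the current list is a permutation of the original, so its sorted
-- form is the fixed sorted list s; A's iteration y matches B's scan of s.drop y
lemma loop_eq (x0 : List String) :
    ∀ (fuel y : Nat) (cur : List String), cur.Perm x0 →
      x0.length - y ≤ fuel →
      exercise_7_loop x0 cur y fuel
        = exercise_7_alt_go x0 ((PySem.List.sorted x0 (fun s => s) false).drop y) := by
  intro fuel
  induction fuel with
  | zero =>
    intro y cur hperm hfuel
    have hy : x0.length ≤ y := by omega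
    rw [List.drop_of_length_le (by rw [PySem.List.length_sorted]; exact hy)]
    rfl
  | succ f ih =>
    intro y cur hperm hfuel
    rw [exercise_7_loop]
    set s := PySem.List.sorted x0 (fun s => s) false with hs
    have hsortcur : PySem.List.sorted cur (fun s => s) false = s :=
      PySem.List.sorted_eq_sorted_of_perm cur x0 (fun s => s) (fun a b h => h) hperm
    have hlencur : cur.length = x0.length := hperm.length_eq
    have hlens : s.length = x0.length := by rw [hs, PySem.List.length_sorted]
    by_cases hcond : (y : Int) ≤ (cur.length : Int) - 1
    · rw [if_pos hcond]
      have hylt : y < s.length := by omega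
      have hget : PySem.List.pyGet? (PySem.List.sorted cur (fun s => s) false) (y : Int)
          = some s[y] := by
        rw [hsortcur, PySem.List.pyGet?_natCast, List.getElem?_eq_getElem hylt]
      simp only [hget]
      have hmem : s[y] ∈ s := List.getElem_mem hylt
      have hrem : PySem.List.remove? (PySem.List.sorted cur (fun s => s) false) s[y]
          = some (s.erase s[y]) := by
        rw [hsortcur]; exact PySem.List.remove?_eq_some_erase s s[y] hmem
      simp only [hrem]
      have hdrop : s.drop y = s[y] :: s.drop (y + 1) := (List.getElem_cons_drop hylt).symm
      have hperm' : ((s.erase s[y]) ++ [s[y]]).Perm x0 := by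
        have h1 : ((s.erase s[y]) ++ [s[y]]).Perm (s[y] :: s.erase s[y]) :=
          List.perm_append_singleton _ _
        exact h1.trans ((List.perm_cons_erase hmem).symm.trans
          (PySem.List.sorted_perm x0 (fun s => s) false))
      rw [hdrop, exercise_7_alt_go]
      by_cases hq : 2 ≤ List.countP (fun u => PySem.Str.isIn s[y] u) x0
      · rw [if_pos ((any_erase_iff x0 s[y] hmem).mpr hq), if_pos hq]
        have hmemx0 : s[y] ∈ x0 := (PySem.List.sorted_perm x0 (fun s => s) false).mem_iff.mp hmem
        obtain ⟨a2, ha2⟩ : ∃ a2, PySem.List.index? x0 s[y] = some a2 := by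
          cases hidx : PySem.List.index? x0 s[y] with
          | none => exact absurd ((PySem.List.index?_eq_none_iff _ _).mp hidx) (by simp [hmemx0])
          | some a2 => exact ⟨a2, rfl⟩
        rw [ha2]; rfl
      · rw [if_neg (by rw [any_erase_iff x0 s[y] hmem]; exact hq), if_neg hq]
        exact ih (y + 1) _ hperm' (by omega)
    · rw [if_neg hcond]
      have hy : x0.length ≤ y := by omega
      rw [List.drop_of_length_le (by omega)]
      rfl

-- ===== VERDICT (by name: the statement is the Claim_ definition above) =====
theorem exercise_7_spec : Claim_equal_exercise_7 := by
  intro x _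
  unfold Spec_exercise_7 exercise_7 exercise_7_alt
  simpa using loop_eq x x.length 0 x (List.Perm.refl x) (by omega)
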